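-- pv_equiv track=rewrite | github.com/nadir-aitlahmouch/Grenoble-inp-Ensimag | Common-Core/Algorithmic/connectes.py | one_component
-- ===== SOURCE A (Python) =====
-- def one_component(indices):
--     """ indices est une iterable sur des couples (i, j) """
--     depart = indices.pop()
--     pile = [depart,]
--     while pile:
--         i, j = pile.pop()
--         for voisin in [(i,j+1), (i,j-1), (i+1,j), (i-1,j)]:
--             if voisin in indices:
--                 indices.remove(voisin)
--                 pile.append(voisin)
--     return len(indices) == 0
-- ===== SOURCE B (Python) =====
-- def one_component(indices):
--     """ indices est une iterable sur des couples (i, j) """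
--     cells = set(indices)
--     start = cells.pop()
--     frontier = {start}
--     while frontier:
--         frontier = {(i + di, j + dj)
--                     for (i, j) in frontier
--                     for di, dj in ((0, 1), (0, -1), (1, 0), (-1, 0))} & cells
--         cells -= frontier
--     return not cells
-- ===== Notes on version B (the rewrite author's own statement) =====
-- stated objective: alternative
-- what changed: Replaces A's explicit DFS stack, which removes one list/set element at a time with a per-neighbour membership test, by a frontier BFS that expands the whole frontier's neighbour set at once with set intersection and difference; B mutates only its own local set, not the argument.
import Mathlib
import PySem

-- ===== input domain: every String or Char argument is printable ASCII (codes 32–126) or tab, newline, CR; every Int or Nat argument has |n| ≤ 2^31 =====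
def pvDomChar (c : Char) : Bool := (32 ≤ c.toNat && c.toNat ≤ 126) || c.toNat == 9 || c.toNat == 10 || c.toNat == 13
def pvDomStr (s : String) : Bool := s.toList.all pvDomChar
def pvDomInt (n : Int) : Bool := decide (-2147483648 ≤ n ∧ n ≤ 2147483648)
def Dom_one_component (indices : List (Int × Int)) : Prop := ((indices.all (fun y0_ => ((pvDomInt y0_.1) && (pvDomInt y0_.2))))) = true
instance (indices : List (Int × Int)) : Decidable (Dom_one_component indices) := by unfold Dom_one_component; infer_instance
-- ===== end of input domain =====

-- B replaces A's explicit DFS stack (with linear list membership/removal) by a frontier BFS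
-- over hash sets; A mutates its list argument (removes reachable cells), B does not — the
-- equivalence proved here is about the RETURN value only.


-- ===== PORT A =====
-- the four orthogonal neighbours [(i,j+1), (i,j-1), (i+1,j), (i-1,j)]
def pvNeighbors (c : Int × Int) : List (Int × Int) :=
  [(c.1, c.2 + 1), (c.1, c.2 - 1), (c.1 + 1, c.2), (c.1 - 1, c.2)]

-- one inner 'for voisin in …' body: if voisin in indices: indices.remove(voisin); pile.append(voisin)
def pvStepA (s : List (Int × Int) × List (Int × Int)) (v : Int × Int) :
    List (Int × Int) × List (Int × Int) :=
  if v ∈ s.1 then (s.1.erase v, s.2 ++ [v]) else s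

-- used by the termination proof of one_component_go
theorem pvStepA_sum_le (vs : List (Int × Int)) (s : List (Int × Int) × List (Int × Int)) :
    (vs.foldl pvStepA s).1.length + (vs.foldl pvStepA s).2.length ≤ s.1.length + s.2.length := by
  induction vs generalizing s with
  | nil => simp
  | cons v vs ih =>
    refine le_trans (ih (pvStepA s v)) ?_
    by_cases h : v ∈ s.1
    · have h1 : 0 < s.1.length := List.length_pos_of_mem h
      simp [pvStepA, h, List.length_erase_of_mem h]
      omega
    · simp [pvStepA, h]

-- the 'while pile:' loop; pile.pop() takes the LAST element
def one_component_go (indices pile : List (Int × Int)) : List (Int × Int) :=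
  match _hp : pile with
  | [] => indices
  | x :: xs =>
    let s := (pvNeighbors ((x :: xs).getLast (List.cons_ne_nil x xs))).foldl pvStepA
      (indices, (x :: xs).dropLast)
    one_component_go s.1 s.2
termination_by indices.length + pile.length
decreasing_by
  have h := pvStepA_sum_le (pvNeighbors ((x :: xs).getLast (List.cons_ne_nil x xs)))
    (indices, (x :: xs).dropLast)
  simp at h ⊢
  omega

def one_component (indices : List (Int × Int)) : Bool :=
  match indices.getLast? with
  | none => false        -- Python raises here (pop from empty); excluded by Pre_
  | some depart => (one_component_go indices.dropLast [depart]).length == 0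

-- ===== PORT B =====
-- the 'while frontier:' loop: frontier = {4 neighbours of frontier} & cells; cells -= frontier
def one_component_alt_go (cells frontier : PySem.Set (Int × Int)) : PySem.Set (Int × Int) :=
  match _hf : frontier with
  | [] => cells
  | y :: ys =>
    let f := PySem.Set.inter (PySem.Set.ofList ((y :: ys).flatMap pvNeighbors)) cells
    one_component_alt_go (PySem.Set.diff cells f) f
termination_by (2 * cells.length + frontier.length.min 1, frontier.length)
decreasing_by
  by_cases hfe : PySem.Set.inter (PySem.Set.ofList ((y :: ys).flatMap pvNeighbors)) cells = []
  · apply Prod.Lex.left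
    rw [hfe]
    simp [PySem.Set.diff]
  · apply Prod.Lex.left
    obtain ⟨w, hw⟩ := List.exists_mem_of_ne_nil _ hfe
    have hwc : w ∈ cells := by
      have := (List.mem_filter.mp hw).2
      simpa using this
    have hlt : (PySem.Set.diff cells
        (PySem.Set.inter (PySem.Set.ofList ((y :: ys).flatMap pvNeighbors)) cells)).length <
        cells.length := by
      apply List.length_filter_lt_length_iff_exists.mpr
      refine ⟨w, hwc, ?_⟩
      have h2 := hw
      simp at h2 ⊢
      exact h2
    have hm : (List.length ((PySem.Set.ofList (List.flatMap pvNeighbors (y :: ys))).inter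
        cells)).min 1 ≤ 1 := Nat.min_le_right _ _
    have hm2 : (List.length (y :: ys)).min 1 = 1 := by
      simp only [List.length_cons]
      exact Nat.min_eq_right (Nat.succ_le_succ (Nat.zero_le _))
    rw [hm2]
    omega

-- cells.pop() removes an arbitrary element of the set; the returned Bool does not depend on
-- which one (proved via pvReach_symm below), so the port takes the first element of the Set.
def one_component_alt (indices : List (Int × Int)) : Bool :=
  match PySem.Set.ofList indices with
  | [] => false        -- Python raises here (pop from an empty set); excluded by Pre_
  | start :: cells => (one_component_alt_go cells [start]).isEmpty

-- ===== PRECONDITION & SPEC =====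
-- Pre_ excludes the empty input, on which A raises (pop from an empty set), and restricts the
-- list to the distinct-element representation of the Python set argument (a list with
-- duplicate cells does not represent a set; the ports' behaviour on such lists is accidental).
def Pre_one_component (indices : List (Int × Int)) : Prop :=
  indices ≠ [] ∧ indices.Nodup
instance (indices : List (Int × Int)) : Decidable (Pre_one_component indices) := by
  unfold Pre_one_component; infer_instance

def pvWitness_one_component : (List (Int × Int)) := [(0, 0), (0, 1), (1, 1), (5, 5)]

def Spec_one_component (indices : List (Int × Int)) (out : Bool) : Prop := out = one_component_alt indices
instance (indices : List (Int × Int)) (out : Bool) : Decidable (Spec_one_component indices out) := by unfold Spec_one_component; infer_instance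

-- ===== CLAIM (what is proved, stated in full; the proofs are below) =====
def Claim_equal_one_component : Prop := ∀ (indices : List (Int × Int)), Dom_one_component indices → Pre_one_component indices → Spec_one_component indices (one_component indices)

-- ===== LEMMAS AND PROOFS =====

-- reachability from src inside the cell set S, by orthogonal adjacency
def pvAdj (a b : Int × Int) : Prop := b ∈ pvNeighbors a

def pvReach (S : List (Int × Int)) (src c : Int × Int) : Prop :=
  Relation.ReflTransGen (fun a b => b ∈ S ∧ pvAdj a b) src c

-- the common loop invariant of both loops: 'rem' = cells not yet reached, 'front' = work list
structure pvInv (S : List (Int × Int)) (src : Int × Int)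
    (rem front : List (Int × Int)) : Prop where
  rem_nodup : rem.Nodup
  front_nodup : front.Nodup
  disj : ∀ x ∈ front, x ∉ rem
  rem_sub : ∀ x ∈ rem, x ∈ S
  front_sub : ∀ x ∈ front, x ∈ S
  src_mem : src ∈ S
  src_out : src ∉ rem
  reached : ∀ x ∈ S, x ∉ rem → pvReach S src x
  closed : ∀ x ∈ S, x ∉ rem → x ∉ front → ∀ v, pvAdj x v → v ∈ S → v ∉ rem

theorem pvReach_mem {S : List (Int × Int)} {src c : Int × Int}
    (hsrc : src ∈ S) (h : pvReach S src c) : c ∈ S := by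
  induction h with
  | refl => exact hsrc
  | tail _ h2 _ => exact h2.1

-- at a closed state with empty work list, every reachable cell is outside rem
theorem pvReach_not_rem {S : List (Int × Int)} {src : Int × Int} {rem : List (Int × Int)}
    (hsrc : src ∈ S) (hout : src ∉ rem)
    (hcl : ∀ x ∈ S, x ∉ rem → ∀ v, pvAdj x v → v ∈ S → v ∉ rem)
    {c : Int × Int} (h : pvReach S src c) : c ∉ rem := by
  induction h with
  | refl => exact hout
  | tail h1 h2 ih => exact hcl _ (pvReach_mem hsrc h1) ih _ h2.2 h2.1

-- an empty closed remainder is equivalent to total reachability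
theorem pvInv_final {S : List (Int × Int)} {src : Int × Int} {rem : List (Int × Int)}
    (h : pvInv S src rem []) : (rem = []) ↔ ∀ x ∈ S, pvReach S src x := by
  constructor
  · intro he x hx
    exact h.reached x hx (by simp [he])
  · intro hall
    by_contra hne
    obtain ⟨x, hx⟩ := List.exists_mem_of_ne_nil _ hne
    exact pvReach_not_rem h.src_mem h.src_out
      (fun y hy hyr => h.closed y hy hyr (by simp)) (hall x (h.rem_sub x hx)) hx

theorem pvNeighbors_nodup (c : Int × Int) : (pvNeighbors c).Nodup := by
  simp [pvNeighbors, Prod.ext_iff]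
  omega

theorem pvAdj_of_mem {c v : Int × Int} (h : v ∈ pvNeighbors c) : pvAdj c v := h

-- ---- A side ----

-- the inner for-loop, characterised: removed = indices \ N(c), pushed = N(c) ∩ indices
theorem pvStepA_foldl_char (vs : List (Int × Int)) :
    ∀ (I P : List (Int × Int)), I.Nodup → vs.Nodup →
    vs.foldl pvStepA (I, P) =
      (I.filter (fun x => decide (x ∉ vs)), P ++ vs.filter (fun x => decide (x ∈ I))) := by
  induction vs with
  | nil => intro I P _ _; simp
  | cons v vs ih =>
    intro I P hI hvs
    have hv : v ∉ vs := (List.nodup_cons.mp hvs).1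
    have hvs' : vs.Nodup := (List.nodup_cons.mp hvs).2
    by_cases hmem : v ∈ I
    · have he : I.erase v = I.filter (fun x => decide (x ≠ v)) := by
        rw [List.Nodup.erase_eq_filter hI]
        apply List.filter_congr
        intro x _
        simp [bne, beq_eq_decide]
      rw [List.foldl_cons]
      have h1 : pvStepA (I, P) v = (I.erase v, P ++ [v]) := by simp [pvStepA, hmem]
      rw [h1, ih _ _ (hI.erase v) hvs']
      simp only [Prod.mk.injEq]
      constructor
      · rw [he, List.filter_filter]
        apply List.filter_congr
        intro x hx
        simp [List.mem_cons, eq_comm]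
        exact Bool.and_comm _ _
      · rw [List.append_assoc]
        congr 1
        simp only [List.filter_cons, decide_eq_true hmem, if_true]
        simp only [List.singleton_append, List.cons.injEq, true_and]
        apply List.filter_congr
        intro x hx
        have hxv : x ≠ v := fun h => hv (h ▸ hx)
        simp [List.mem_erase_of_ne hxv]
    · rw [List.foldl_cons]
      have h1 : pvStepA (I, P) v = (I, P) := by simp [pvStepA, hmem]
      rw [h1, ih _ _ hI hvs']
      simp only [Prod.mk.injEq]
      constructor
      · apply List.filter_congr
        intro x hx
        have hxv : x ≠ v := fun h => hmem (h ▸ hx)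
        simp [hxv]
      · congr 1
        simp only [List.filter_cons]
        simp [hmem]

theorem pvInvA_step {S : List (Int × Int)} {src : Int × Int} {indices rest : List (Int × Int)}
    {c : Int × Int} (h : pvInv S src indices (rest ++ [c])) :
    pvInv S src (indices.filter (fun x => decide (x ∉ pvNeighbors c)))
      (rest ++ (pvNeighbors c).filter (fun x => decide (x ∈ indices))) := by
  obtain ⟨hrn, hpn, hdisj, hrs, hps, hsm, hso, hre, hcl⟩ := h
  have hcmem : c ∈ rest ++ [c] := by simp
  have hcS : c ∈ S := hps c hcmem
  have hcni : c ∉ indices := hdisj c hcmem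
  obtain ⟨hrestn, -, hrdisj⟩ := List.nodup_append.mp hpn
  have hcnr : c ∉ rest := fun hc => hrdisj c hc c (by simp) rfl
  have hrest_sub : ∀ x ∈ rest, x ∈ S := fun x hx => hps x (by simp [hx])
  have hrest_ni : ∀ x ∈ rest, x ∉ indices := fun x hx => hdisj x (by simp [hx])
  have hreach_c : pvReach S src c := hre c hcS hcni
  refine ⟨hrn.filter _, ?_, ?_, ?_, ?_, hsm, ?_, ?_, ?_⟩
  · rw [List.nodup_append]
    refine ⟨hrestn, (pvNeighbors_nodup c).filter _, ?_⟩
    intro a ha b hb hab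
    subst hab
    have : a ∈ indices := by
      have := List.mem_filter.mp hb
      simpa using this.2
    exact hrest_ni a ha this
  · intro x hx hx2
    have hx2' := List.mem_filter.mp hx2
    rcases List.mem_append.mp hx with hr | hf
    · exact hrest_ni x hr hx2'.1
    · have : x ∈ pvNeighbors c := (List.mem_filter.mp hf).1
      simp [this] at hx2'
  · intro x hx
    exact hrs x (List.mem_filter.mp hx).1
  · intro x hx
    rcases List.mem_append.mp hx with hr | hf
    · exact hrest_sub x hr
    · have : x ∈ indices := by
        have := (List.mem_filter.mp hf).2
        simpa using this
      exact hrs x this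
  · intro hx
    exact hso (List.mem_filter.mp hx).1
  · intro x hxS hx
    by_cases hxi : x ∈ indices
    · have hxN : x ∈ pvNeighbors c := by
        by_contra hn
        exact hx (List.mem_filter.mpr ⟨hxi, by simpa using hn⟩)
      exact hreach_c.tail ⟨hxS, pvAdj_of_mem hxN⟩
    · exact hre x hxS hxi
  · intro x hxS hx hxf v hadj hvS
    by_cases hxi : x ∈ indices
    · exfalso
      have hxN : x ∈ pvNeighbors c := by
        by_contra hn
        exact hx (List.mem_filter.mpr ⟨hxi, by simpa using hn⟩)
      exact hxf (List.mem_append.mpr (Or.inr (List.mem_filter.mpr ⟨hxN, by simpa using hxi⟩)))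
    · by_cases hxc : x = c
      · subst hxc
        intro hv
        have hvi := (List.mem_filter.mp hv).1
        have hvN : v ∈ pvNeighbors x := hadj
        have := (List.mem_filter.mp hv).2
        simp [hvN] at this
      · have hxrest : x ∉ rest := fun hr => hxf (List.mem_append.mpr (Or.inl hr))
        have hxpile : x ∉ rest ++ [c] := by simp [hxrest, hxc]
        have hvni := hcl x hxS hxi hxpile v hadj hvS
        intro hv
        exact hvni (List.mem_filter.mp hv).1

theorem one_component_go_char {S : List (Int × Int)} {src : Int × Int} :
    ∀ (indices pile : List (Int × Int)), pvInv S src indices pile →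
    (one_component_go indices pile = [] ↔ ∀ x ∈ S, pvReach S src x) := by
  intro indices pile
  induction indices, pile using one_component_go.induct with
  | case1 indices =>
    intro h
    rw [one_component_go]
    exact pvInv_final h
  | case2 indices x xs s ih =>
    intro h
    have hpile : (x :: xs).dropLast ++ [(x :: xs).getLast (List.cons_ne_nil x xs)] = x :: xs :=
      List.dropLast_append_getLast _
    have h' : pvInv S src indices
        ((x :: xs).dropLast ++ [(x :: xs).getLast (List.cons_ne_nil x xs)]) := by
      rw [hpile]; exact h
    have hstep := pvInvA_step h'
    have hchar := pvStepA_foldl_char (pvNeighbors ((x :: xs).getLast (List.cons_ne_nil x xs)))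
      indices (x :: xs).dropLast h.rem_nodup
      (pvNeighbors_nodup ((x :: xs).getLast (List.cons_ne_nil x xs)))
    rw [one_component_go]
    show one_component_go (List.foldl pvStepA (indices, (x :: xs).dropLast)
      (pvNeighbors ((x :: xs).getLast (List.cons_ne_nil x xs)))).1
      (List.foldl pvStepA (indices, (x :: xs).dropLast)
      (pvNeighbors ((x :: xs).getLast (List.cons_ne_nil x xs)))).2 = [] ↔ _
    rw [hchar]
    have ih' := ih
    rw [show s = (List.foldl pvStepA (indices, (x :: xs).dropLast)
      (pvNeighbors ((x :: xs).getLast (List.cons_ne_nil x xs)))) from rfl, hchar] at ih'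
    exact ih' hstep

-- ---- B side ----

theorem pvInvB_step {S : List (Int × Int)} {src : Int × Int}
    {cells frontier : List (Int × Int)} (_hne : frontier ≠ [])
    (h : pvInv S src cells frontier) :
    pvInv S src
      (PySem.Set.diff cells (PySem.Set.inter (PySem.Set.ofList (frontier.flatMap pvNeighbors)) cells))
      (PySem.Set.inter (PySem.Set.ofList (frontier.flatMap pvNeighbors)) cells) := by
  obtain ⟨hrn, hfn, hdisj, hrs, hfs, hsm, hso, hre, hcl⟩ := h
  have hmf : ∀ x, x ∈ PySem.Set.inter (PySem.Set.ofList (frontier.flatMap pvNeighbors)) cells ↔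
      (∃ u ∈ frontier, x ∈ pvNeighbors u) ∧ x ∈ cells := by
    intro x
    rw [PySem.Set.mem_inter, PySem.Set.mem_ofList, List.mem_flatMap]
  have hmc : ∀ x, x ∈ PySem.Set.diff cells
      (PySem.Set.inter (PySem.Set.ofList (frontier.flatMap pvNeighbors)) cells) ↔
      x ∈ cells ∧ ¬ ((∃ u ∈ frontier, x ∈ pvNeighbors u) ∧ x ∈ cells) := by
    intro x
    rw [PySem.Set.mem_diff, hmf]
  refine ⟨PySem.Set.nodup_diff _ _ hrn, PySem.Set.nodup_inter _ _ (PySem.Set.nodup_ofList _), ?_, ?_, ?_,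
    hsm, ?_, ?_, ?_⟩
  · intro x hx hx2
    exact ((hmc x).mp hx2).2 ((hmf x).mp hx)
  · intro x hx
    exact hrs x ((hmc x).mp hx).1
  · intro x hx
    exact hrs x ((hmf x).mp hx).2
  · intro hx
    exact hso ((hmc _).mp hx).1
  · intro x hxS hx
    by_cases hxc : x ∈ cells
    · have hxf : x ∈ PySem.Set.inter (PySem.Set.ofList (frontier.flatMap pvNeighbors)) cells := by
        by_contra hn
        exact hx ((hmc x).mpr ⟨hxc, fun hc => hn ((hmf x).mpr ⟨hc.1, hxc⟩)⟩)
      obtain ⟨⟨u, hu, hadj⟩, -⟩ := (hmf x).mp hxf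
      have hu_reach : pvReach S src u := hre u (hfs u hu) (hdisj u hu)
      exact hu_reach.tail ⟨hxS, pvAdj_of_mem hadj⟩
    · exact hre x hxS hxc
  · intro x hxS hx hxf v hadj hvS hv
    have hxc : x ∉ cells := by
      intro hc
      exact hx ((hmc x).mpr ⟨hc, fun hcon => hxf ((hmf x).mpr ⟨hcon.1, hc⟩)⟩)
    have hvcells : v ∈ cells := ((hmc v).mp hv).1
    by_cases hxfr : x ∈ frontier
    · exact ((hmc v).mp hv).2 ⟨⟨x, hxfr, hadj⟩, hvcells⟩
    · exact hcl x hxS hxc hxfr v hadj hvS hvcells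

theorem one_component_alt_go_char {S : List (Int × Int)} {src : Int × Int} :
    ∀ (cells frontier : List (Int × Int)), pvInv S src cells frontier →
    (one_component_alt_go cells frontier = [] ↔ ∀ x ∈ S, pvReach S src x) := by
  intro cells frontier
  induction cells, frontier using one_component_alt_go.induct with
  | case1 cells =>
    intro h
    rw [one_component_alt_go]
    exact pvInv_final h
  | case2 cells y ys f ih =>
    intro h
    rw [one_component_alt_go]
    exact ih (pvInvB_step (List.cons_ne_nil y ys) h)

-- ---- initial states ----

theorem pvInvA_init {ys : List (Int × Int)} {d : Int × Int}
    (hn : ys.Nodup) (hd : ys.getLast? = some d) :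
    pvInv ys d ys.dropLast [d] := by
  obtain ⟨l', rfl⟩ := List.getLast?_eq_some_iff.mp hd
  rw [List.dropLast_concat]
  obtain ⟨hl'n, -, hdisj⟩ := List.nodup_append.mp hn
  have hdn : d ∉ l' := fun hc => hdisj d hc d (by simp) rfl
  refine ⟨hl'n, by simp, ?_, ?_, by simp, by simp, hdn, ?_, ?_⟩
  · intro x hx
    simp at hx
    subst hx
    exact hdn
  · intro x hx
    simp [hx]
  · intro x hxS hx
    have hxd : x = d := by
      rcases List.mem_append.mp hxS with h1 | h1
      · exact absurd h1 hx
      · simpa using h1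
    subst hxd
    exact Relation.ReflTransGen.refl
  · intro x hxS hx hxf
    exfalso
    rcases List.mem_append.mp hxS with h1 | h1
    · exact hx h1
    · simp at h1
      subst h1
      exact hxf (by simp)

theorem pvInvB_init {x : Int × Int} {xs : List (Int × Int)}
    (hn : (x :: xs).Nodup) : pvInv (x :: xs) x xs [x] := by
  obtain ⟨hx, hxs⟩ := List.nodup_cons.mp hn
  refine ⟨hxs, by simp, ?_, ?_, by simp, by simp, hx, ?_, ?_⟩
  · intro y hy
    simp at hy
    subst hy
    exact hx
  · intro y hy
    simp [hy]
  · intro y hyS hy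
    have : y = x := by
      rcases List.mem_cons.mp hyS with h1 | h1
      · exact h1
      · exact absurd h1 hy
    subst this
    exact Relation.ReflTransGen.refl
  · intro y hyS hy hyf
    exfalso
    rcases List.mem_cons.mp hyS with h1 | h1
    · exact hyf (by simp [h1])
    · exact hy h1

theorem pvAdj_symm {a b : Int × Int} (h : pvAdj a b) : pvAdj b a := by
  obtain ⟨i, j⟩ := a
  obtain ⟨k, l⟩ := b
  simp [pvAdj, pvNeighbors, Prod.ext_iff] at h ⊢
  omega

theorem pvReach_symm {S : List (Int × Int)} {src c : Int × Int}
    (hsrc : src ∈ S) (h : pvReach S src c) : pvReach S c src := by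
  induction h with
  | refl => exact Relation.ReflTransGen.refl
  | tail h1 h2 ih =>
    exact Relation.ReflTransGen.head ⟨pvReach_mem hsrc h1, pvAdj_symm h2.2⟩ ih

-- total reachability does not depend on the chosen start cell
theorem pvReach_all_indep {S : List (Int × Int)} {d m : Int × Int}
    (hd : d ∈ S) (hm : m ∈ S) (h : ∀ x ∈ S, pvReach S d x) :
    ∀ x ∈ S, pvReach S m x := by
  intro x hx
  exact (pvReach_symm hd (h m hm)).trans (h x hx)

-- ===== VERDICT (by name: the statement is the Claim_ definition above) =====
theorem one_component_spec : Claim_equal_one_component := by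
  intro indices _ hpre
  unfold Spec_one_component one_component one_component_alt
  obtain ⟨hne, hnd⟩ := hpre
  obtain ⟨d, hd⟩ : ∃ d, indices.getLast? = some d := by
    cases h : indices.getLast? with
    | none => exact absurd (List.getLast?_eq_none_iff.mp h) hne
    | some d => exact ⟨d, rfl⟩
  have hofl : PySem.Set.ofList indices = indices := PySem.Set.ofList_eq_self_of_nodup _ hnd
  rw [hd, hofl]
  cases indices with
  | nil => exact absurd rfl hne
  | cons i is =>
    have hA := one_component_go_char (S := i :: is) (src := d) _ _ (pvInvA_init hnd hd)
    have hB := one_component_alt_go_char (S := i :: is) (src := i) _ _ (pvInvB_init hnd)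
    have hdS : d ∈ i :: is := List.mem_of_getLast? hd
    have hiS : i ∈ i :: is := by simp
    rw [Bool.eq_iff_iff]
    simp only [beq_iff_eq, List.length_eq_zero_iff, List.isEmpty_iff]
    rw [hA, hB]
    exact ⟨pvReach_all_indep hdS hiS, pvReach_all_indep hiS hdS⟩
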